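-- pv_equiv track=rewrite | github.com/00rayan/brute-generator | main.py | get_combination_count
-- ===== SOURCE A (Python) =====
-- def get_combination_count(minimum_length, maximum_length):
--   current_length = minimum_length
--   combination_count = 0
--   while current_length <= maximum_length:
--     current_count = pow(95, current_length) # Calculate combination count per length
--     combination_count = combination_count + current_count # Total combination count
--     current_length = current_length + 1
--   return combination_count
-- ===== SOURCE B (Python) =====
-- def get_combination_count(minimum_length, maximum_length):
--   if minimum_length > maximum_length:
--     return 0
--   # geometric series: sum_{L=min}^{max} 95^L = (95^(max+1) - 95^min) / 94
--   return (pow(95, maximum_length + 1) - pow(95, minimum_length)) // 94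
-- ===== Notes on version B (the rewrite author's own statement) =====
-- stated objective: simpler
-- what changed: Replaces the per-length loop of big-integer powers with the closed-form geometric series (95^(max+1) - 95^min) // 94 computed by a single pair of exponentiations.
-- outside the precondition, e.g. on get_combination_count(-1, 0): A returns 1.0105263157894737, B returns 1.0
import Mathlib
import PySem

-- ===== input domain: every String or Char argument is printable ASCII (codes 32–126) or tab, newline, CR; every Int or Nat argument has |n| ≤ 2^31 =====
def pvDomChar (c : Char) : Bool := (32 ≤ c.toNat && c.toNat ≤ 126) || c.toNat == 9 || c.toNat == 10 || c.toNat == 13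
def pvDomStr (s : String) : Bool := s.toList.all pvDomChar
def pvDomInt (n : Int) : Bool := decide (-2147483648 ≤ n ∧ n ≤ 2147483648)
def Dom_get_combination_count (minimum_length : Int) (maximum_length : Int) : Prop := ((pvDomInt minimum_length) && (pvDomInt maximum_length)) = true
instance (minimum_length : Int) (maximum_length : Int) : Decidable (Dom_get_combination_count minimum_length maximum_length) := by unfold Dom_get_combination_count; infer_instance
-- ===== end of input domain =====

-- B replaces A's per-length summation loop with the closed-form geometric series (simpler, no loop).
-- ===== PORT A =====
-- the while loop of A: state (current_length, combination_count)
def gccLoop (maximum_length : Int) (current_length : Int) (combination_count : Int) : Int :=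
  if current_length ≤ maximum_length then
    gccLoop maximum_length (current_length + 1) (combination_count + 95 ^ current_length.toNat)
  else combination_count
termination_by (maximum_length + 1 - current_length).toNat
decreasing_by omega

def get_combination_count (minimum_length : Int) (maximum_length : Int) : Int :=
  gccLoop maximum_length minimum_length 0

-- ===== PORT B =====
def get_combination_count_alt (minimum_length : Int) (maximum_length : Int) : Int :=
  if minimum_length > maximum_length then 0
  else PySem.Int.floordiv (95 ^ (maximum_length + 1).toNat - 95 ^ minimum_length.toNat) 94

-- ===== PRECONDITION & SPEC =====
-- Pre_ excludes minimum_length < 0 ≤ maximum_length, where A's pow(95, negative) makes it return a float, not an int.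
def Pre_get_combination_count (minimum_length : Int) (maximum_length : Int) : Prop :=
  0 ≤ minimum_length ∨ maximum_length < minimum_length
instance (minimum_length : Int) (maximum_length : Int) : Decidable (Pre_get_combination_count minimum_length maximum_length) := by unfold Pre_get_combination_count; infer_instance
def pvWitness_get_combination_count : Int × Int := (1, 4)
def Spec_get_combination_count (minimum_length : Int) (maximum_length : Int) (out : Int) : Prop := out = get_combination_count_alt minimum_length maximum_length
instance (minimum_length : Int) (maximum_length : Int) (out : Int) : Decidable (Spec_get_combination_count minimum_length maximum_length out) := by unfold Spec_get_combination_count; infer_instance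

-- ===== CLAIM (what is proved, stated in full; the proofs are below) =====
def Claim_equal_get_combination_count : Prop := ∀ (minimum_length : Int) (maximum_length : Int), Dom_get_combination_count minimum_length maximum_length → Pre_get_combination_count minimum_length maximum_length → Spec_get_combination_count minimum_length maximum_length (get_combination_count minimum_length maximum_length)

-- ===== LEMMAS AND PROOFS =====

-- pulling the accumulator out of the loop
theorem gccLoop_acc (mx : Int) : ∀ (n : Nat) (cur acc : Int), (mx + 1 - cur).toNat = n →
    gccLoop mx cur acc = acc + gccLoop mx cur 0 := by
  intro n
  induction n with
  | zero =>
    intro cur acc h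
    have hnc : ¬ cur ≤ mx := by omega
    conv_lhs => rw [gccLoop]
    conv_rhs => rw [gccLoop]
    simp [hnc]
  | succ k ih =>
    intro cur acc h
    conv_lhs => rw [gccLoop]
    conv_rhs => rw [gccLoop]
    by_cases hc : cur ≤ mx
    · simp only [hc, if_pos]
      rw [ih (cur + 1) (acc + 95 ^ cur.toNat) (by omega),
          ih (cur + 1) (0 + 95 ^ cur.toNat) (by omega)]
      ring
    · simp [hc]

-- the loop from cur computes the geometric sum: 94 * result = 95^(mx+1) - 95^cur
theorem gccLoop_geom (mx : Int) : ∀ (n : Nat) (cur : Int), 0 ≤ cur → (mx + 1 - cur).toNat = n →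
    cur ≤ mx + 1 →
    94 * gccLoop mx cur 0 = 95 ^ (mx + 1).toNat - 95 ^ cur.toNat := by
  intro n
  induction n with
  | zero =>
    intro cur h0 h hle
    have hcur : cur = mx + 1 := by omega
    have hnc : ¬ cur ≤ mx := by omega
    rw [gccLoop]
    simp [hcur]
  | succ k ih =>
    intro cur h0 h hle
    have hc : cur ≤ mx := by omega
    rw [gccLoop]
    simp only [hc, if_pos]
    rw [gccLoop_acc mx k (cur + 1) _ (by omega)]
    rw [mul_add, ih (cur + 1) (by omega) (by omega) (by omega)]
    have hpow : (95:Int) ^ (cur + 1).toNat = 95 * 95 ^ cur.toNat := by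
      have h1 : (cur + 1).toNat = cur.toNat + 1 := by omega
      rw [h1, pow_succ]; ring
    rw [hpow]; ring

-- ===== VERDICT (by name: the statement is the Claim_ definition above) =====
theorem get_combination_count_spec : Claim_equal_get_combination_count := by
  intro mn mx _ hpre
  unfold Spec_get_combination_count get_combination_count get_combination_count_alt
  by_cases hgt : mn > mx
  · rw [gccLoop]
    have : ¬ mn ≤ mx := by omega
    simp [this, hgt]
  · have h0 : 0 ≤ mn := by rcases hpre with h | h; exact h; omega
    simp only [hgt, if_neg, not_false_iff]
    have hg := gccLoop_geom mx ((mx + 1 - mn).toNat) mn h0 rfl (by omega)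
    rw [← hg]
    rw [show (94:Int) * gccLoop mx mn 0 = gccLoop mx mn 0 * 94 by ring]
    rw [PySem.Int.floordiv_eq_ediv_of_pos (by norm_num)]
    simp
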